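-- pv_equiv track=rewrite | github.com/lcontreras21/CMSC208-Final-Project | lang_model.py | find_max_bigram
-- ===== SOURCE A (Python) =====
-- def find_max_bigram(model, word):
-- 	possible_bigram = {}
-- 	for bigram in model:
-- 		if bigram[0] == word:
-- 			possible_bigram[bigram] = model[bigram]
--
-- 	vals = list(possible_bigram.values())
-- 	keys = list(possible_bigram.keys())
-- 	return keys[vals.index(max(vals))]
-- ===== SOURCE B (Python) =====
-- def find_max_bigram(model, word):
-- 	best_key = None
-- 	best_val = None
-- 	for bigram in model:
-- 		if bigram[0] == word:
-- 			v = model[bigram]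
-- 			if best_val is None or v > best_val:
-- 				best_key, best_val = bigram, v
-- 	if best_key is None:
-- 		raise ValueError("no bigram starts with the given word")
-- 	return best_key
-- ===== Notes on version B (the rewrite author's own statement) =====
-- stated objective: simpler
-- what changed: Replaces A's intermediate dict of candidate bigrams plus parallel values/keys lists and a max+index scan by a single streaming pass that keeps the current best bigram/count, updating only on strictly greater count (so the first maximum in iteration order wins ties, as in A).
import Mathlib
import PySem

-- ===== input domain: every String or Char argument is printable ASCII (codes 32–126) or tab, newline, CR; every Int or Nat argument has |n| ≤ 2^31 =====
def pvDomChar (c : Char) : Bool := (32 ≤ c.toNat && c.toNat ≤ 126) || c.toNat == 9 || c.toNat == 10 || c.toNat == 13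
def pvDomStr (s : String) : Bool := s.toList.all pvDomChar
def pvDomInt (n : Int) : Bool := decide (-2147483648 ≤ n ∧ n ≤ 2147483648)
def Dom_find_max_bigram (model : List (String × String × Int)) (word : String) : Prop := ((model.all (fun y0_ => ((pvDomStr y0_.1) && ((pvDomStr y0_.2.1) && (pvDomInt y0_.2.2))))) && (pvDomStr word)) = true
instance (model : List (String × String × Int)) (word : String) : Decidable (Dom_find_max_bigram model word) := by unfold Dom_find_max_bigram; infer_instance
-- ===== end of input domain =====

-- B replaces A's candidate dict + parallel values/keys lists + max/index scan by one streaming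
-- pass keeping the current best (strictly-greater update, so the first maximum wins ties): simpler.

-- ===== PORT A =====
-- Python's `model[bigram]` (dict lookup, insertion-order list, first match); used by both programs.
def pvModelGet (model : List (String × String × Int)) (k : String × String) : Int :=
  ((PySem.Dict.mk (model.map (fun p => ((p.1, p.2.1), p.2.2)))).get? k).getD 0

def find_max_bigram (model : List (String × String × Int)) (word : String) : String × String :=
  let possible : PySem.Dict (String × String) Int :=
    model.foldl (fun d p =>
      if p.1 == word then d.insert (p.1, p.2.1) (pvModelGet model (p.1, p.2.1)) else d)
      PySem.Dict.empty
  let vals := possible.values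
  let keys := possible.keys
  match PySem.List.max? vals (fun v => v) with
  | none => ("", "")        -- max([]) raises ValueError here; excluded by Pre_
  | some m =>
    match PySem.List.index? vals m with
    | none => ("", "")      -- unreachable: the max is a member of vals
    | some i => (PySem.List.pyGet? keys (i : Int)).getD ("", "")

-- ===== PORT B =====
def find_max_bigram_alt (model : List (String × String × Int)) (word : String) : String × String :=
  let best :=
    model.foldl (fun best p =>
      if p.1 == word then
        let v := pvModelGet model (p.1, p.2.1)
        match best with
        | none => some ((p.1, p.2.1), v)
        | some (bk, bv) => if v > bv then some ((p.1, p.2.1), v) else some (bk, bv)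
      else best) (none : Option ((String × String) × Int))
  match best with
  | none => ("", "")        -- Source B raises ValueError here; excluded by Pre_
  | some (bk, _) => bk

-- ===== PRECONDITION & SPEC =====
-- Pre_ excludes (a) inputs with no bigram starting with `word`, on which A's max([]) raises
-- ValueError (and B raises ValueError too), and (b) lists with duplicate bigram keys, which no
-- Python input reaches: `model` is a Python dict, whose keys are distinct by construction.
def Pre_find_max_bigram (model : List (String × String × Int)) (word : String) : Prop :=
  (model.any (fun p => p.1 == word) = true) ∧ (model.map (fun p => (p.1, p.2.1))).Nodup
instance (model : List (String × String × Int)) (word : String) : Decidable (Pre_find_max_bigram model word) := by unfold Pre_find_max_bigram; infer_instance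
def pvWitness_find_max_bigram : (List (String × String × Int)) × String :=
  ([("a", "b", 1), ("a", "c", 3), ("b", "a", 2)], "a")
def Spec_find_max_bigram (model : List (String × String × Int)) (word : String) (out : String × String) : Prop := out = find_max_bigram_alt model word
instance (model : List (String × String × Int)) (word : String) (out : String × String) : Decidable (Spec_find_max_bigram model word out) := by unfold Spec_find_max_bigram; infer_instance

-- ===== CLAIM (what is proved, stated in full; the proofs are below) =====
def Claim_equal_find_max_bigram : Prop := ∀ (model : List (String × String × Int)) (word : String), Dom_find_max_bigram model word → Pre_find_max_bigram model word → Spec_find_max_bigram model word (find_max_bigram model word)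

-- ===== LEMMAS AND PROOFS =====

-- first-maximum-from-the-left of `g` over a key list, with its key
def pvAmf (g : String × String → Int) : List (String × String) → Option ((String × String) × Int)
  | [] => none
  | k :: t =>
    match pvAmf g t with
    | none => some (k, g k)
    | some (k', v') => if v' > g k then some (k', v') else some (k, g k)

-- B's loop body, on extracted keys
def pvBStep (g : String × String → Int) (best : Option ((String × String) × Int))
    (k0 : String × String) : Option ((String × String) × Int) :=
  match best with
  | none => some (k0, g k0)
  | some (bk, bv) => if g k0 > bv then some (k0, g k0) else some (bk, bv)

-- A's tail: keys[vals.index(max(vals))]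
def pvSelect (keys : List (String × String)) (vals : List Int) : String × String :=
  match PySem.List.max? vals (fun v => v) with
  | none => ("", "")
  | some m =>
    match PySem.List.index? vals m with
    | none => ("", "")
    | some i => (PySem.List.pyGet? keys (i : Int)).getD ("", "")

def pvPick (o : Option ((String × String) × Int)) : String × String :=
  match o with
  | none => ("", "")
  | some (bk, _) => bk

theorem pvAmf_eq_none_iff (g : String × String → Int) (l : List (String × String)) :
    pvAmf g l = none ↔ l = [] := by
  cases l with
  | nil => simp [pvAmf]
  | cons k t =>
    simp only [pvAmf]
    split
    · simp
    · split <;> simp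

theorem pvAmf_foldl (g : String × String → Int) (l : List (String × String))
    (k : String × String) (v : Int) :
    l.foldl (pvBStep g) (some (k, v))
      = match pvAmf g l with
        | none => some (k, v)
        | some (k', v') => if v' > v then some (k', v') else some (k, v) := by
  induction l generalizing k v with
  | nil => simp [pvAmf]
  | cons k0 t ih =>
    simp only [List.foldl_cons, pvAmf]
    rw [show pvBStep g (some (k, v)) k0
        = if g k0 > v then some (k0, g k0) else some (k, v) from rfl]
    by_cases h : g k0 > v
    · rw [if_pos h, ih]
      cases hpt : pvAmf g t with
      | none =>
        show some (k0, g k0) = if g k0 > v then some (k0, g k0) else some (k, v)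
        rw [if_pos h]
      | some kv =>
        obtain ⟨k', v'⟩ := kv
        show (if v' > g k0 then some (k', v') else some (k0, g k0))
            = match (if v' > g k0 then some (k', v') else some (k0, g k0)) with
              | none => some (k, v)
              | some (k'', v'') => if v'' > v then some (k'', v'') else some (k, v)
        by_cases h2 : v' > g k0
        · rw [if_pos h2]
          show some (k', v') = if v' > v then some (k', v') else some (k, v)
          rw [if_pos (by omega)]
        · rw [if_neg h2]
          show some (k0, g k0) = if g k0 > v then some (k0, g k0) else some (k, v)
          rw [if_pos h]
    · rw [if_neg h, ih]
      cases hpt : pvAmf g t with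
      | none =>
        show some (k, v) = if g k0 > v then some (k0, g k0) else some (k, v)
        rw [if_neg h]
      | some kv =>
        obtain ⟨k', v'⟩ := kv
        show (if v' > v then some (k', v') else some (k, v))
            = match (if v' > g k0 then some (k', v') else some (k0, g k0)) with
              | none => some (k, v)
              | some (k'', v'') => if v'' > v then some (k'', v'') else some (k, v)
        by_cases h2 : v' > g k0
        · rw [if_pos h2]
        · rw [if_neg h2]
          show (if v' > v then some (k', v') else some (k, v))
              = if g k0 > v then some (k0, g k0) else some (k, v)
          rw [if_neg h, if_neg (by omega)]

theorem pvAmf_foldl_none (g : String × String → Int) (l : List (String × String)) :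
    l.foldl (pvBStep g) none = pvAmf g l := by
  cases l with
  | nil => rfl
  | cons k t =>
    simp only [List.foldl_cons]
    rw [show pvBStep g none k = some (k, g k) from rfl, pvAmf_foldl]
    simp only [pvAmf]

theorem pvAmf_char (g : String × String → Int) :
    ∀ (l : List (String × String)) (bk : String × String) (bv : Int),
      pvAmf g l = some (bk, bv) →
      ∃ pre suf, l = pre ++ bk :: suf ∧ g bk = bv ∧
        (∀ x ∈ pre, g x < bv) ∧ (∀ x ∈ suf, g x ≤ bv) := by
  intro l
  induction l with
  | nil => intro bk bv h; simp [pvAmf] at h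
  | cons k t ih =>
    intro bk bv h
    simp only [pvAmf] at h
    split at h
    next hpt =>
      have ht : t = [] := (pvAmf_eq_none_iff g t).mp hpt
      subst ht
      simp only [Option.some.injEq, Prod.mk.injEq] at h
      obtain ⟨hk, hv⟩ := h
      subst hk
      exact ⟨[], [], rfl, hv, by simp, by simp⟩
    next k' v' hpt =>
      split at h
      next hgt =>
        simp only [Option.some.injEq, Prod.mk.injEq] at h
        obtain ⟨hk, hv⟩ := h
        subst hk; subst hv
        obtain ⟨pre, suf, hdec, hg, hpre, hsuf⟩ := ih k' v' hpt
        refine ⟨k :: pre, suf, by rw [hdec]; rfl, hg, ?_, hsuf⟩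
        intro x hx
        rcases List.mem_cons.mp hx with h1 | h1
        · subst h1; omega
        · exact hpre x h1
      next hgt =>
        simp only [Option.some.injEq, Prod.mk.injEq] at h
        obtain ⟨hk, hv⟩ := h
        subst hk; subst hv
        obtain ⟨pre, suf, hdec, hg, hpre, hsuf⟩ := ih k' v' hpt
        refine ⟨[], t, by simp, rfl, by simp, ?_⟩
        intro x hx
        rw [hdec] at hx
        rcases List.mem_append.mp hx with h1 | h1
        · have := hpre x h1; omega
        · rcases List.mem_cons.mp h1 with h2 | h2
          · subst h2; omega
          · have := hsuf x h2; omega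

theorem pvMax?_eq (xs : List Int) (m : Int) (h1 : m ∈ xs) (h2 : ∀ y ∈ xs, y ≤ m) :
    PySem.List.max? xs (fun v => v) = some m := by
  cases hx : PySem.List.max? xs (fun v => v) with
  | none =>
    rw [PySem.List.max?_eq_none_iff] at hx
    rw [hx] at h1
    simp at h1
  | some m' =>
    have hmem := PySem.List.max?_mem hx
    have hmax := PySem.List.max?_isMax hx
    have h3 : m' ≤ m := h2 _ hmem
    have h4 : m ≤ m' := hmax _ h1
    have h5 : m' = m := by omega
    rw [h5]

theorem pvSelect_eq (g : String × String → Int) (ks : List (String × String))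
    (bk : String × String) (bv : Int) (h : pvAmf g ks = some (bk, bv)) :
    pvSelect ks (ks.map g) = bk := by
  obtain ⟨pre, suf, hdec, hg, hpre, hsuf⟩ := pvAmf_char g ks bk bv h
  subst hdec
  have hmax : PySem.List.max? ((pre ++ bk :: suf).map g) (fun v => v) = some bv := by
    apply pvMax?_eq
    · simp only [List.map_append, List.map_cons, hg]
      exact List.mem_append.mpr (Or.inr List.mem_cons_self)
    · intro y hy
      simp only [List.map_append, List.map_cons, List.mem_append, List.mem_cons,
        List.mem_map] at hy
      rcases hy with ⟨x, hx, rfl⟩ | (rfl | ⟨x, hx, rfl⟩)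
      · have := hpre x hx; omega
      · omega
      · exact hsuf x hx
  have hidx : PySem.List.index? ((pre ++ bk :: suf).map g) bv = some pre.length := by
    rw [PySem.List.index?_eq_some_iff]
    refine ⟨pre.map g, suf.map g, by simp [hg], by simp, ?_⟩
    intro hmem
    rcases List.mem_map.mp hmem with ⟨x, hx, hgx⟩
    have := hpre x hx; omega
  unfold pvSelect
  simp only [hmax, hidx]
  rw [PySem.List.pyGet?_append_length]
  rfl

theorem pvFoldl_B (g : String × String → Int) (word : String) :
    ∀ (l : List (String × String × Int)) (acc : Option ((String × String) × Int)),
      l.foldl (fun best p => if p.1 == word then pvBStep g best (p.1, p.2.1) else best) acc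
        = ((l.filter (fun p => p.1 == word)).map (fun p => (p.1, p.2.1))).foldl (pvBStep g) acc := by
  intro l
  induction l with
  | nil => intro acc; rfl
  | cons p t ih =>
    intro acc
    by_cases h : (p.1 == word) = true
    · simp only [List.foldl_cons, List.filter_cons, if_pos h, List.map_cons, ih]
    · simp only [List.foldl_cons, List.filter_cons, if_neg h, ih]

-- ===== VERDICT (by name: the statement is the Claim_ definition above) =====
theorem find_max_bigram_spec : Claim_equal_find_max_bigram := by
  intro model word _hdom hpre
  obtain ⟨hex, hnd⟩ := hpre
  show find_max_bigram model word = find_max_bigram_alt model word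
  have hLsub : (model.filter (fun p => p.1 == word)).Sublist model := List.filter_sublist
  have hksnd : ((model.filter (fun p => p.1 == word)).map (fun p => (p.1, p.2.1))).Nodup :=
    (hLsub.map _).nodup hnd
  have hksne : (model.filter (fun p => p.1 == word)).map (fun p => (p.1, p.2.1)) ≠ [] := by
    rcases List.any_eq_true.mp hex with ⟨p, hp, hpw⟩
    have hmem : p ∈ model.filter (fun p => p.1 == word) := List.mem_filter.mpr ⟨hp, hpw⟩
    intro hcontra
    rw [List.map_eq_nil_iff] at hcontra
    rw [hcontra] at hmem
    simp at hmem
  obtain ⟨⟨bk, bv⟩, hamf⟩ :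
      ∃ kv, pvAmf (pvModelGet model)
        ((model.filter (fun p => p.1 == word)).map (fun p => (p.1, p.2.1))) = some kv := by
    cases hx : pvAmf (pvModelGet model)
        ((model.filter (fun p => p.1 == word)).map (fun p => (p.1, p.2.1))) with
    | none => exact absurd ((pvAmf_eq_none_iff _ _).mp hx) hksne
    | some kv => exact ⟨kv, rfl⟩
  -- B side
  have hB : find_max_bigram_alt model word = bk := by
    have h0 : find_max_bigram_alt model word
        = pvPick (model.foldl
            (fun best p => if p.1 == word then pvBStep (pvModelGet model) best (p.1, p.2.1) else best)
            none) := rfl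
    rw [h0, pvFoldl_B (pvModelGet model) word model none, pvAmf_foldl_none, hamf]
    rfl
  -- A side
  have hfilter : model.foldl
      (fun d p => if p.1 == word then d.insert (p.1, p.2.1) (pvModelGet model (p.1, p.2.1)) else d)
      PySem.Dict.empty
      = (model.filter (fun p => p.1 == word)).foldl
          (fun d p => d.insert (p.1, p.2.1) (pvModelGet model (p.1, p.2.1)))
          PySem.Dict.empty := List.foldl_filter.symm
  have hitems0 : ((model.filter (fun p => p.1 == word)).foldl
      (fun d p => d.insert (p.1, p.2.1) (pvModelGet model (p.1, p.2.1)))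
      PySem.Dict.empty).items
      = (PySem.Dict.empty : PySem.Dict (String × String) Int).items
        ++ (model.filter (fun p => p.1 == word)).map
            (fun p => ((p.1, p.2.1), pvModelGet model (p.1, p.2.1))) := by
    apply PySem.Dict.items_foldl_insert_fresh
    · intro a _ha; simp [PySem.Dict.contains_empty]
    · exact hksnd
  have hitems : ((model.filter (fun p => p.1 == word)).foldl
      (fun d p => d.insert (p.1, p.2.1) (pvModelGet model (p.1, p.2.1)))
      PySem.Dict.empty).items
      = (model.filter (fun p => p.1 == word)).map
          (fun p => ((p.1, p.2.1), pvModelGet model (p.1, p.2.1))) := by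
    simpa using hitems0
  have hkeys : PySem.Dict.keys ((model.filter (fun p => p.1 == word)).foldl
      (fun d p => d.insert (p.1, p.2.1) (pvModelGet model (p.1, p.2.1))) PySem.Dict.empty)
      = (model.filter (fun p => p.1 == word)).map (fun p => (p.1, p.2.1)) := by
    show (((model.filter (fun p => p.1 == word)).foldl
      (fun d p => d.insert (p.1, p.2.1) (pvModelGet model (p.1, p.2.1)))
      PySem.Dict.empty).items).map (·.1)
      = (model.filter (fun p => p.1 == word)).map (fun p => (p.1, p.2.1))
    rw [hitems, List.map_map]
    rfl
  have hvals : PySem.Dict.values ((model.filter (fun p => p.1 == word)).foldl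
      (fun d p => d.insert (p.1, p.2.1) (pvModelGet model (p.1, p.2.1))) PySem.Dict.empty)
      = ((model.filter (fun p => p.1 == word)).map (fun p => (p.1, p.2.1))).map (pvModelGet model) := by
    show (((model.filter (fun p => p.1 == word)).foldl
      (fun d p => d.insert (p.1, p.2.1) (pvModelGet model (p.1, p.2.1)))
      PySem.Dict.empty).items).map (·.2)
      = ((model.filter (fun p => p.1 == word)).map (fun p => (p.1, p.2.1))).map (pvModelGet model)
    rw [hitems, List.map_map, List.map_map]
    rfl
  have hA0 : find_max_bigram model word
      = pvSelect (PySem.Dict.keys (model.foldl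
          (fun d p => if p.1 == word then d.insert (p.1, p.2.1) (pvModelGet model (p.1, p.2.1)) else d)
          PySem.Dict.empty))
        (PySem.Dict.values (model.foldl
          (fun d p => if p.1 == word then d.insert (p.1, p.2.1) (pvModelGet model (p.1, p.2.1)) else d)
          PySem.Dict.empty)) := rfl
  rw [hA0, hfilter, hkeys, hvals, hB]
  exact pvSelect_eq (pvModelGet model) _ bk bv hamf
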